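-- pv_equiv track=rewrite | github.com/Shubheeksha/graph-theory-cryptography | src/graph_cryptography.py | _read_by_column_order
-- ===== SOURCE A (Python) =====
-- def _read_by_column_order(matrix, key_order):
--     result = ""
--     sorted_indices = sorted(range(len(key_order)), key=lambda k: key_order[k])
--     for col_idx in sorted_indices:
--         for row in matrix:
--             if col_idx < len(row):
--                 result += row[col_idx]
--     return result
-- ===== SOURCE B (Python) =====
-- def _read_by_column_order(matrix, key_order):
--     # Row-major single pass: distribute each row's chars into per-column buckets,
--     # then emit the buckets in stable key-sorted order.
--     n = len(key_order)
--     buckets = [""] * n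
--     for row in matrix:
--         chunk = row[:n]
--         buckets = [b + c for b, c in zip(buckets, chunk)] + buckets[len(chunk):]
--     pairs = sorted(enumerate(key_order), key=lambda p: p[1])
--     return "".join(buckets[c] for c, _ in pairs)
-- ===== Notes on version B (the rewrite author's own statement) =====
-- stated objective: faster
-- what changed: B traverses the matrix once in row-major order, distributing each row's characters into per-column buckets, then concatenates the buckets in stable key-sorted order; A sorts the column indices first and then makes one full column-major scan of the matrix per index, growing the result one character at a time.
import Mathlib
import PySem

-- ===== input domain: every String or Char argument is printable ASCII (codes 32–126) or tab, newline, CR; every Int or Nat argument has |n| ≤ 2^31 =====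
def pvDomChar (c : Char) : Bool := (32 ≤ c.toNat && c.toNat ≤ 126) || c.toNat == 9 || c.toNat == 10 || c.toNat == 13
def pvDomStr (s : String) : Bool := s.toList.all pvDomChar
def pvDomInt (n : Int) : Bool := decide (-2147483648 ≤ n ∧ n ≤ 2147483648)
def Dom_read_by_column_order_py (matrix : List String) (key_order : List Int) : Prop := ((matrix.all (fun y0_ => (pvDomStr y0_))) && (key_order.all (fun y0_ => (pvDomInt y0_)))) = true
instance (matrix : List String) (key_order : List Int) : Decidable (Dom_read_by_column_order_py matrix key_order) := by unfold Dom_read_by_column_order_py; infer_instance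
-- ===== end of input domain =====

-- B makes a single row-major pass distributing characters into per-column buckets and then
-- emits the buckets in stable key-sorted order, instead of A's per-column column-major scans.

-- ===== PORT A =====
def read_by_column_order_py (matrix : List String) (key_order : List Int) : String :=
  -- result = ""; sorted_indices = sorted(range(len(key_order)), key=lambda k: key_order[k])
  let sorted_indices :=
    PySem.List.sorted (PySem.List.pyRange 0 (PySem.List.len key_order) 1)
      (fun k => PySem.List.pyGetD key_order k 0)
  -- for col_idx in sorted_indices: for row in matrix: if col_idx < len(row): result += row[col_idx]
  String.mk (sorted_indices.foldl
    (fun result col_idx =>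
      matrix.foldl
        (fun result row =>
          if col_idx < PySem.Str.len row then
            result ++ [PySem.List.pyGetD row.toList col_idx ' ']
          else result)
        result)
    [])

-- ===== PORT B =====
-- buckets = [b + c for b, c in zip(buckets, chunk)] + buckets[len(chunk):]
def pvAppendChars (bs : List (List Char)) (cs : List Char) : List (List Char) :=
  (List.zipWith (fun b c => b ++ [c]) bs cs) ++ bs.drop cs.length

def read_by_column_order_py_alt (matrix : List String) (key_order : List Int) : String :=
  -- n = len(key_order); buckets = [""] * n
  let n := PySem.List.len key_order
  let buckets0 : List (List Char) := key_order.map (fun _ => [])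
  -- for row in matrix: chunk = row[:n]; buckets = positionwise-append
  let buckets := matrix.foldl
    (fun bs row => pvAppendChars bs (PySem.List.slice row.toList none (some n))) buckets0
  -- pairs = sorted(enumerate(key_order), key=lambda p: p[1])
  let pairs := PySem.List.sorted (PySem.List.enumerate key_order) (fun p => p.2)
  -- "".join(buckets[c] for c, _ in pairs)
  String.mk (pairs.flatMap (fun p => buckets.getD p.1.toNat []))

-- ===== PRECONDITION & SPEC =====
def Spec_read_by_column_order_py (matrix : List String) (key_order : List Int) (out : String) : Prop := out = read_by_column_order_py_alt matrix key_order
instance (matrix : List String) (key_order : List Int) (out : String) : Decidable (Spec_read_by_column_order_py matrix key_order out) := by unfold Spec_read_by_column_order_py; infer_instance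

-- ===== CLAIM =====
def Claim_equal_read_by_column_order_py : Prop := ∀ (matrix : List String) (key_order : List Int), Dom_read_by_column_order_py matrix key_order → Spec_read_by_column_order_py matrix key_order (read_by_column_order_py matrix key_order)

-- ===== LEMMAS AND PROOFS =====

-- column c of the matrix, as A reads it: ''.join(row[c] for row in matrix if c < len(row))
def pvColumn (matrix : List String) (c : Int) : List Char :=
  matrix.flatMap (fun row =>
    if c < PySem.Str.len row then [PySem.List.pyGetD row.toList c ' '] else [])

-- insertBy commutes with map when the comparison only looks through h
theorem pv_insertBy_map {α β : Type} (before : β → β → Bool) (h : α → β) (x : α) (ys : List α) :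
    PySem.List.insertBy before (h x) (ys.map h)
      = (PySem.List.insertBy (fun a b => before (h a) (h b)) x ys).map h := by
  induction ys with
  | nil => simp [PySem.List.insertBy]
  | cons y ys ih =>
    simp only [List.map_cons, PySem.List.insertBy]
    split <;> simp_all

-- a stable key sort of a mapped list is the map of the sort by the composed key
theorem pv_sorted_map {α β κ : Type} [LT κ] [DecidableLT κ]
    (xs : List α) (h : α → β) (key : β → κ) :
    PySem.List.sorted (xs.map h) key
      = (PySem.List.sorted xs (fun x => key (h x))).map h := by
  rw [PySem.List.sorted_eq_foldl_insertBy, PySem.List.sorted_eq_foldl_insertBy]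
  suffices H : ∀ (acc : List α),
      List.foldl (fun acc x => PySem.List.insertBy (fun a b => decide (key a < key b)) x acc)
        (acc.map h) (xs.map h)
      = (List.foldl (fun acc x =>
          PySem.List.insertBy (fun a b => decide (key (h a) < key (h b))) x acc) acc xs).map h by
    simpa using H []
  induction xs with
  | nil => intro acc; simp
  | cons x xs ih =>
    intro acc
    simp only [List.map_cons, List.foldl_cons]
    rw [pv_insertBy_map (fun a b => decide (key a < key b)) h x acc, ih]

-- A's inner row loop appends exactly the column of the matrix
theorem pv_inner_eq (matrix : List String) (c : Int) (res : List Char) :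
    matrix.foldl
      (fun result row =>
        if c < PySem.Str.len row then
          result ++ [PySem.List.pyGetD row.toList c ' ']
        else result)
      res = res ++ pvColumn matrix c := by
  induction matrix generalizing res with
  | nil => simp [pvColumn]
  | cons row rows ih =>
    simp only [List.foldl_cons, pvColumn, List.flatMap_cons]
    split <;> rw [ih] <;> simp [pvColumn]

theorem pv_length_pvAppendChars (bs : List (List Char)) (cs : List Char) :
    (pvAppendChars bs cs).length = bs.length := by
  simp [pvAppendChars]; omega

theorem pv_getD_pvAppendChars (bs : List (List Char)) (cs : List Char) (i : Nat) :
    (pvAppendChars bs cs).getD i []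
      = bs.getD i [] ++ (if i < cs.length ∧ i < bs.length then [cs.getD i ' '] else []) := by
  induction bs generalizing cs i with
  | nil => simp [pvAppendChars]
  | cons b bs ih =>
    cases cs with
    | nil => simp [pvAppendChars]
    | cons c cs =>
      have : pvAppendChars (b :: bs) (c :: cs) = (b ++ [c]) :: pvAppendChars bs cs := by
        simp [pvAppendChars]
      rw [this]
      cases i with
      | zero => simp
      | succ i =>
        simp only [List.getD_cons_succ, ih, List.length_cons]
        by_cases h1 : i < cs.length ∧ i < bs.length <;> simp [h1]

-- effect of the whole row loop on bucket i
theorem pv_fold_getD (g : String → List Char) (rows : List String)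
    (bs : List (List Char)) (i : Nat) :
    ((rows.foldl (fun bs row => pvAppendChars bs (g row)) bs).getD i [])
      = bs.getD i []
        ++ rows.flatMap (fun row =>
            if i < (g row).length ∧ i < bs.length then [(g row).getD i ' '] else []) := by
  induction rows generalizing bs with
  | nil => simp
  | cons r rows ih =>
    simp only [List.foldl_cons, List.flatMap_cons]
    rw [ih, pv_getD_pvAppendChars]
    simp [pv_length_pvAppendChars]

theorem pv_getD_map_const (l : List Int) (i : Nat) :
    (l.map (fun _ => ([] : List Char))).getD i [] = [] := by
  simp only [List.getD_eq_getElem?_getD, List.getElem?_map]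
  cases l[i]? <;> simp

-- bucket j.toNat after the pass is exactly column j
theorem pv_bucket_eq_column (matrix : List String) (key_order : List Int) (j : Int)
    (h0 : 0 ≤ j) (hj : j < (key_order.length : Int)) :
    ((matrix.foldl
        (fun bs row => pvAppendChars bs
          (PySem.List.slice row.toList none (some (PySem.List.len key_order))))
        (key_order.map (fun _ => []))).getD j.toNat [])
      = pvColumn matrix j := by
  rw [pv_fold_getD, pv_getD_map_const]
  simp only [List.nil_append, pvColumn]
  congr 1
  funext row
  rw [PySem.List.slice_to _ (by simp [PySem.List.len])]
  have hn : (PySem.List.len key_order).toNat = key_order.length := by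
    simp [PySem.List.len]
  rw [hn]
  have hjn : j.toNat < key_order.length := by omega
  by_cases hr : j.toNat < row.toList.length
  · have hc : j.toNat < (row.toList.take key_order.length).length ∧
        j.toNat < (key_order.map (fun _ => ([] : List Char))).length := by
      rw [List.length_take, List.length_map]; omega
    have hlt : j < PySem.Str.len row := by
      have := PySem.Str.len_eq row; omega
    rw [if_pos hc, if_pos hlt]
    have : (row.toList.take key_order.length).getD j.toNat ' ' = row.toList.getD j.toNat ' ' := by
      simp [List.getD_eq_getElem?_getD, hjn]
    rw [this]
    have hcast : j = ((j.toNat : Nat) : Int) := by omega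
    rw [hcast, PySem.List.pyGetD_natCast]
    have hmax : max j 0 = j := by omega
    simp [hmax]
  · have hc : ¬ (j.toNat < (row.toList.take key_order.length).length ∧
        j.toNat < (key_order.map (fun _ => ([] : List Char))).length) := by
      rw [List.length_take, List.length_map]; omega
    have hlt : ¬ j < PySem.Str.len row := by
      have := PySem.Str.len_eq row; omega
    rw [if_neg hc, if_neg hlt]

-- ===== VERDICT =====
theorem read_by_column_order_py_spec : Claim_equal_read_by_column_order_py := by
  intro matrix key_order _
  show read_by_column_order_py matrix key_order = read_by_column_order_py_alt matrix key_order
  unfold read_by_column_order_py read_by_column_order_py_alt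
  dsimp only
  rw [PySem.List.enumerate_eq_map_pyRange key_order 0]
  rw [pv_sorted_map (PySem.List.pyRange 0 (PySem.List.len key_order) 1)
        (fun j => (j, PySem.List.pyGetD key_order j 0)) (fun p => p.2)]
  rw [show (fun result col_idx =>
        matrix.foldl
          (fun result row =>
            if col_idx < PySem.Str.len row then
              result ++ [PySem.List.pyGetD row.toList col_idx ' ']
            else result)
          result)
      = (fun result col_idx => result ++ pvColumn matrix col_idx) from
      funext fun res => funext fun c => pv_inner_eq matrix c res]
  rw [PySem.List.foldl_append_eq_flatMap]
  congr 1
  rw [List.flatMap_map]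
  apply List.flatMap_congr
  intro j hj
  have hmem : j ∈ PySem.List.pyRange 0 (PySem.List.len key_order) 1 :=
    (PySem.List.mem_sorted _ _ _ _).mp hj
  have hb := PySem.List.mem_pyRange_one.mp hmem
  have hlen : PySem.List.len key_order = (key_order.length : Int) := by
    simp [PySem.List.len]
  exact (pv_bucket_eq_column matrix key_order j hb.1 (by omega)).symm
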